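-- pv_equiv track=rewrite | github.com/timvonsachs/anima-compliance | scripts/generate-countdown-post.py | extract_branche_from_audit
-- ===== SOURCE A (Python) =====
-- def extract_branche_from_audit(content, fm):
--     """Branche aus Frontmatter oder Inhalt."""
--     # Direkt aus Frontmatter
--     for key in ['branche', 'industry', 'vertical']:
--         if key in fm:
--             return fm[key]
--     # Aus chatbot_typ
--     lower = content.lower()
--     if 'legaltech' in lower or 'rechtsanwalt' in lower or 'kanzlei' in lower or 'legal' in lower:
--         return 'LegalTech'
--     if 'fintech' in lower or 'bank' in lower or 'kredit' in lower or 'payment' in lower: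
--         return 'FinTech'
--     if 'health' in lower or 'mediz' in lower or 'klinik' in lower:
--         return 'HealthTech'
--     if 'ecommerce' in lower or 'shop' in lower or 'produkt' in lower or 'versand' in lower:
--         return 'E-Commerce'
--     if 'saas' in lower or 'projektmanagement' in lower or 'software' in lower:
--         return 'B2B SaaS'
--     if 'hr' in lower or 'personal' in lower or 'bewerb' in lower:
--         return 'HRTech'
--     return 'B2B SaaS'
-- ===== SOURCE B (Python) =====
-- _KEYS = {'branche': 0, 'industry': 1, 'vertical': 2}
-- _KEY_NAMES = ('branche', 'industry', 'vertical')
-- _KEYWORDS = {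
--     'legaltech': 0, 'rechtsanwalt': 0, 'kanzlei': 0, 'legal': 0,
--     'fintech': 1, 'bank': 1, 'kredit': 1, 'payment': 1,
--     'health': 2, 'mediz': 2, 'klinik': 2,
--     'ecommerce': 3, 'shop': 3, 'produkt': 3, 'versand': 3,
--     'saas': 4, 'projektmanagement': 4, 'software': 4,
--     'hr': 5, 'personal': 5, 'bewerb': 5,
-- }
-- _LABELS = ('LegalTech', 'FinTech', 'HealthTech', 'E-Commerce', 'B2B SaaS', 'HRTech')
--
--
-- def extract_branche_from_audit(content, fm):
--     """Branche aus Frontmatter oder Inhalt.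
--
--     Inverted index: every keyword maps to its category's priority; the answer
--     is the category of MINIMAL priority among all hits (default priority 4 =
--     'B2B SaaS'), instead of an ordered chain of category tests.
--     """
--     prio = min((_KEYS[k] for k in fm if k in _KEYS), default=None)
--     if prio is not None:
--         return fm[_KEY_NAMES[prio]]
--     lower = content.lower()
--     return _LABELS[min((i for kw, i in _KEYWORDS.items() if kw in lower), default=4)]
-- ===== Notes on version B (the rewrite author's own statement) =====
-- stated objective: alternative
-- what changed: Replaced the ordered if-or chain (first matching category wins) by an inverted keyword-to-priority index aggregated with min(): every keyword is tested once and the category of minimal priority among all hits is returned (default priority 4 = 'B2B SaaS'); the frontmatter keys are likewise selected by minimal priority over the dict's keys rather than probed in order.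
import Mathlib
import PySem

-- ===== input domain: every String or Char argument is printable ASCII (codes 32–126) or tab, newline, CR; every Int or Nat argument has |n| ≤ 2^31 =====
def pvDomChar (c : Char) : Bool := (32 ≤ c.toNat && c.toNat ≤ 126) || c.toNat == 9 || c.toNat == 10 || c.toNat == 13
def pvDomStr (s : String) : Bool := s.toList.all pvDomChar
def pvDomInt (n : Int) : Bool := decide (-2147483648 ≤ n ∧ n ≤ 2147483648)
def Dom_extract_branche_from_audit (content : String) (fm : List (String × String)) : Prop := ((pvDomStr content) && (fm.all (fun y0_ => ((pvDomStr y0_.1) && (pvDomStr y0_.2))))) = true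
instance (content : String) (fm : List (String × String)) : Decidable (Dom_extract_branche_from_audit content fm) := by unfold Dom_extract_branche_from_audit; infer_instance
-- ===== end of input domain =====

-- B replaces A's ordered first-match category chain by an inverted keyword→priority index aggregated with min (alternative, same cost).

-- ===== PORT A =====
-- A's frontmatter loop: 'for key in [...]: if key in fm: return fm[key]' (dict lookup = first match).
def pvFmLoop (fm : List (String × String)) : List String → Option String
  | [] => none
  | k :: rest =>
    match fm.find? (fun p => p.1 == k) with
    | some p => some p.2
    | none => pvFmLoop fm rest

def extract_branche_from_audit (content : String) (fm : List (String × String)) : String :=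
  match pvFmLoop fm ["branche", "industry", "vertical"] with
  | some v => v
  | none =>
    let lower := PySem.Str.lower content
    if PySem.Str.isIn "legaltech" lower || PySem.Str.isIn "rechtsanwalt" lower || PySem.Str.isIn "kanzlei" lower || PySem.Str.isIn "legal" lower then "LegalTech"
    else if PySem.Str.isIn "fintech" lower || PySem.Str.isIn "bank" lower || PySem.Str.isIn "kredit" lower || PySem.Str.isIn "payment" lower then "FinTech"
    else if PySem.Str.isIn "health" lower || PySem.Str.isIn "mediz" lower || PySem.Str.isIn "klinik" lower then "HealthTech"
    else if PySem.Str.isIn "ecommerce" lower || PySem.Str.isIn "shop" lower || PySem.Str.isIn "produkt" lower || PySem.Str.isIn "versand" lower then "E-Commerce"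
    else if PySem.Str.isIn "saas" lower || PySem.Str.isIn "projektmanagement" lower || PySem.Str.isIn "software" lower then "B2B SaaS"
    else if PySem.Str.isIn "hr" lower || PySem.Str.isIn "personal" lower || PySem.Str.isIn "bewerb" lower then "HRTech"
    else "B2B SaaS"

-- ===== PORT B =====
-- B: inverted index keyword → category priority; answer = category of minimal priority among hits.
def pvKeyPrio : List (String × Nat) := [("branche", 0), ("industry", 1), ("vertical", 2)]
def pvKeyNames : List String := ["branche", "industry", "vertical"]
def pvKw : List (String × Nat) :=
  [("legaltech", 0), ("rechtsanwalt", 0), ("kanzlei", 0), ("legal", 0),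
   ("fintech", 1), ("bank", 1), ("kredit", 1), ("payment", 1),
   ("health", 2), ("mediz", 2), ("klinik", 2),
   ("ecommerce", 3), ("shop", 3), ("produkt", 3), ("versand", 3),
   ("saas", 4), ("projektmanagement", 4), ("software", 4),
   ("hr", 5), ("personal", 5), ("bewerb", 5)]
def pvLabels : List String := ["LegalTech", "FinTech", "HealthTech", "E-Commerce", "B2B SaaS", "HRTech"]

-- running minimum of Python's min() over a generator
def pvOMin (acc : Option Nat) (i : Nat) : Option Nat :=
  match acc with | none => some i | some m => some (min m i)

def extract_branche_from_audit_alt (content : String) (fm : List (String × String)) : String :=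
  let prio := fm.foldl (fun acc p =>
    match pvKeyPrio.find? (fun q => q.1 == p.1) with
    | some q => pvOMin acc q.2
    | none => acc) none
  match prio with
  | some i =>
    match fm.find? (fun p => p.1 == pvKeyNames.getD i "") with
    | some p => p.2
    | none => ""   -- unreachable: prio = some i means the key is present
  | none =>
    let lower := PySem.Str.lower content
    let c := pvKw.foldl (fun acc kw => if PySem.Str.isIn kw.1 lower then pvOMin acc kw.2 else acc) none
    pvLabels.getD (c.getD 4) ""

-- ===== PRECONDITION & SPEC =====
def Spec_extract_branche_from_audit (content : String) (fm : List (String × String)) (out : String) : Prop := out = extract_branche_from_audit_alt content fm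
instance (content : String) (fm : List (String × String)) (out : String) : Decidable (Spec_extract_branche_from_audit content fm out) := by unfold Spec_extract_branche_from_audit; infer_instance

-- ===== CLAIM (what is proved, stated in full; the proofs are below) =====
def Claim_equal_extract_branche_from_audit : Prop := ∀ (content : String) (fm : List (String × String)), Dom_extract_branche_from_audit content fm → Spec_extract_branche_from_audit content fm (extract_branche_from_audit content fm)

-- ===== LEMMAS AND PROOFS =====

theorem pvOMin_pvOMin (a : Option Nat) (i j : Nat) : pvOMin (pvOMin a i) j = pvOMin a (min i j) := by
  cases a <;> simp [pvOMin, Nat.min_assoc]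

theorem pvOMin_none (i : Nat) : pvOMin none i = some i := rfl

-- characterisation of B's frontmatter priority fold
theorem fmPrio_char (fm : List (String × String)) (acc : Option Nat) :
    fm.foldl (fun acc p =>
      match pvKeyPrio.find? (fun q => q.1 == p.1) with
      | some q => pvOMin acc q.2
      | none => acc) acc =
    (if fm.any (fun p => p.1 == "branche") then pvOMin acc 0
     else if fm.any (fun p => p.1 == "industry") then pvOMin acc 1
     else if fm.any (fun p => p.1 == "vertical") then pvOMin acc 2
     else acc) := by
  induction fm generalizing acc with
  | nil => simp
  | cons p fm ih =>
    by_cases hb : p.1 = "branche"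
    · have hfind : pvKeyPrio.find? (fun q => q.1 == p.1) = some ("branche", 0) := by
        simp only [hb]; rfl
      have hb' : (p.1 == "branche") = true := by simp [hb]
      simp only [List.foldl_cons, hfind, ih, List.any_cons, hb', Bool.true_or, if_true,
        pvOMin_pvOMin]
      split_ifs <;> simp
    · have hb2 : ("branche" == p.1) = false := by
        simp only [beq_eq_false_iff_ne, ne_eq]; exact fun h => hb h.symm
      have hb' : (p.1 == "branche") = false := by simp [hb]
      by_cases hi : p.1 = "industry"
      · have hfind : pvKeyPrio.find? (fun q => q.1 == p.1) = some ("industry", 1) := by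
          simp only [hi]; rfl
        have hi' : (p.1 == "industry") = true := by simp [hi]
        simp only [List.foldl_cons, hfind, ih, List.any_cons, hb', hi', Bool.false_or,
          Bool.true_or, if_true, pvOMin_pvOMin]
        split_ifs <;> simp
      · have hi2 : ("industry" == p.1) = false := by
          simp only [beq_eq_false_iff_ne, ne_eq]; exact fun h => hi h.symm
        have hi' : (p.1 == "industry") = false := by simp [hi]
        by_cases hv : p.1 = "vertical"
        · have hfind : pvKeyPrio.find? (fun q => q.1 == p.1) = some ("vertical", 2) := by
            simp only [hv]; rfl
          have hv' : (p.1 == "vertical") = true := by simp [hv]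
          simp only [List.foldl_cons, hfind, ih, List.any_cons, hb', hi', hv', Bool.false_or,
            Bool.true_or, if_true, pvOMin_pvOMin]
          split_ifs <;> simp
        · have hv2 : ("vertical" == p.1) = false := by
            simp only [beq_eq_false_iff_ne, ne_eq]; exact fun h => hv h.symm
          have hv' : (p.1 == "vertical") = false := by simp [hv]
          have hfind : pvKeyPrio.find? (fun q => q.1 == p.1) = none := by
            simp [pvKeyPrio, List.find?, hb2, hi2, hv2]
          simp only [List.foldl_cons, hfind, ih, List.any_cons, hb', hi', hv', Bool.false_or]

-- folding one keyword group (all keywords with the same priority j)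
theorem kwGroup_char (lower : String) (j : Nat) (kws : List String) (acc : Option Nat) :
    (kws.map (fun s => (s, j))).foldl
      (fun acc kw => if PySem.Str.isIn kw.1 lower then pvOMin acc kw.2 else acc) acc =
    (if kws.any (fun s => PySem.Str.isIn s lower) then pvOMin acc j else acc) := by
  induction kws generalizing acc with
  | nil => simp
  | cons s kws ih =>
    cases h : PySem.Str.isIn s lower with
    | true =>
      simp only [List.map_cons, List.foldl_cons, List.any_cons, h, if_true, Bool.true_or, ih,
        pvOMin_pvOMin]
      split_ifs <;> simp
    | false =>
      simp only [List.map_cons, List.foldl_cons, List.any_cons, h, Bool.false_eq_true,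
        if_false, Bool.false_or, ih]

theorem pvKw_groups : pvKw =
    (["legaltech", "rechtsanwalt", "kanzlei", "legal"].map (fun s => (s, 0))) ++
    (["fintech", "bank", "kredit", "payment"].map (fun s => (s, 1))) ++
    (["health", "mediz", "klinik"].map (fun s => (s, 2))) ++
    (["ecommerce", "shop", "produkt", "versand"].map (fun s => (s, 3))) ++
    (["saas", "projektmanagement", "software"].map (fun s => (s, 4))) ++
    (["hr", "personal", "bewerb"].map (fun s => (s, 5))) := rfl

theorem any_eq_isSome_find? (fm : List (String × String)) (k : String) :
    fm.any (fun p => p.1 == k) = (fm.find? (fun p => p.1 == k)).isSome := by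
  induction fm with
  | nil => rfl
  | cons p fm ih =>
    cases h : p.1 == k <;> simp [List.any_cons, List.find?, h, ih]

theorem pvName0 : pvKeyNames.getD 0 "" = "branche" := rfl
theorem pvName1 : pvKeyNames.getD 1 "" = "industry" := rfl
theorem pvName2 : pvKeyNames.getD 2 "" = "vertical" := rfl

-- ===== VERDICT (by name: the statement is the Claim_ definition above) =====
set_option maxHeartbeats 2000000 in
theorem extract_branche_from_audit_spec : Claim_equal_extract_branche_from_audit := by
  intro content fm _
  unfold Spec_extract_branche_from_audit extract_branche_from_audit extract_branche_from_audit_alt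
  simp only [fmPrio_char, any_eq_isSome_find?]
  cases h1 : fm.find? (fun p => p.1 == "branche") <;>
    cases h2 : fm.find? (fun p => p.1 == "industry") <;>
      cases h3 : fm.find? (fun p => p.1 == "vertical") <;>
        simp only [pvFmLoop, h1, h2, h3, Option.isSome_some, Option.isSome_none,
          Bool.false_eq_true, if_true, if_false, pvOMin_none, pvName0, pvName1, pvName2]
  -- remaining case: no frontmatter key matched; compare the if-chain with the keyword min-fold
  rw [pvKw_groups]
  simp only [List.foldl_append, kwGroup_char, List.any_cons, List.any_nil, Bool.or_false, Bool.or_assoc]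
  split_ifs <;> rfl
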